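-- pv_equiv track=rewrite | github.com/gbodeen/algorhythmix | python/project-euler/PE049.py | allPermutes
-- ===== SOURCE A (Python) =====
-- def allPermutes(n):
--   def permute(s):
--     if len(s) <= 1:
--       return [s]
--     permutations = []
--     for i in range(len(s)):
--       substring = s[:i] + s[i+1:]
--       subpermutes = [s[i] + el for el in permute(substring)]
--       permutations.extend(subpermutes)
--     return sorted(list(set(permutations)))
--
--   return [int(s) for s in permute(''.join(sorted(str(n))))]
-- ===== SOURCE B (Python) =====
-- def allPermutes(n):
--   s = ''.join(sorted(str(n)))
--   # breadth-first: states are (prefix built so far, characters still unused)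
--   states = [('', s)]
--   for _ in range(len(s)):
--     states = [(p + r[i], r[:i] + r[i+1:]) for (p, r) in states for i in range(len(r))]
--   return [int(p) for p in sorted({p for (p, _) in states})]
-- ===== Notes on version B (the rewrite author's own statement) =====
-- stated objective: alternative
-- what changed: Replaces A's recursive depth-first permutation generator that deduplicates and sorts at every recursion level with an iterative breadth-first worklist of (prefix, remaining) states, deduplicating and sorting only once at the end; Pre_ excludes negative n, on which both implementations raise ValueError when int() meets a permutation with '-' in the middle.
import Mathlib
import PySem

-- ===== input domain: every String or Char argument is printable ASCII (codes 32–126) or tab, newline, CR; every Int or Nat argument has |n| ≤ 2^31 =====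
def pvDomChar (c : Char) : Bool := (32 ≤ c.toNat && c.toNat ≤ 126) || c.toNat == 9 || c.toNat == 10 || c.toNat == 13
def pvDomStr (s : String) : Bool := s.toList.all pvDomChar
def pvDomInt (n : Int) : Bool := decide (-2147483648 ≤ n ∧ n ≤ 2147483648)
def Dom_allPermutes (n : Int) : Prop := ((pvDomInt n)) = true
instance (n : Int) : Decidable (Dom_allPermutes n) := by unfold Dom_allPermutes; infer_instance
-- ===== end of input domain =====

-- B replaces A's recursive depth-first generator (dedup + sort at every level) by an
-- iterative breadth-first worklist of (prefix, remaining) states with one final dedup/sort;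
-- same output, no speed claim.


-- ===== PORT A =====
-- A's inner recursive helper `permute`: for each position i, recurse on the string with
-- position i removed, prepend s[i], then return sorted(list(set(...))).
-- s[i] is ported as pyGetD (i is always in range here); int(...) below as (ofChars? _).getD 0
-- (never the default inside Pre_, where every generated string is a digit string).
def permuteA (s : List Char) : List (List Char) :=
  if s.length ≤ 1 then [s]
  else
    PySem.List.sorted (PySem.Set.ofList
      ((PySem.List.pyRange 0 (s.length : Int) 1).attach.foldl
        (fun acc i =>
          acc ++ (permuteA (PySem.List.slice s none (some i.1) ++
                            PySem.List.slice s (some (i.1 + 1)) none)).map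
              (fun el => PySem.List.pyGetD s i.1 ' ' :: el)) [])) (fun x => x)
termination_by s.length
decreasing_by
  have hm := (PySem.List.mem_pyRange_one).mp i.2
  simp [PySem.List.slice_to s hm.1, PySem.List.slice_from s (by omega : (0:Int) ≤ i.1 + 1)]
  omega

def allPermutes (n : Int) : List Int :=
  (permuteA (PySem.List.sorted (PySem.Int.toChars n) (fun c => c))).map
    (fun t => (PySem.Int.ofChars? t).getD 0)

-- ===== PORT B =====
-- one breadth-first step: extend every (prefix, remaining) state by each position of remaining
def bfsStep (states : List (List Char × List Char)) : List (List Char × List Char) :=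
  states.flatMap (fun pr =>
    (PySem.List.pyRange 0 (pr.2.length : Int) 1).map (fun i =>
      (pr.1 ++ [PySem.List.pyGetD pr.2 i ' '],
       PySem.List.slice pr.2 none (some i) ++ PySem.List.slice pr.2 (some (i + 1)) none)))

def allPermutes_alt (n : Int) : List Int :=
  let s := PySem.List.sorted (PySem.Int.toChars n) (fun c => c)
  let states := (List.range s.length).foldl (fun st _ => bfsStep st) [(([] : List Char), s)]
  (PySem.List.sorted (PySem.Set.ofList (states.map (·.1))) (fun x => x)).map
    (fun p => (PySem.Int.ofChars? p).getD 0)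

-- ===== PRECONDITION & SPEC =====
-- Pre_ excludes negative n: there both A and B raise ValueError (int() applied to a digit
-- permutation with '-' in the middle).
def Pre_allPermutes (n : Int) : Prop := 0 ≤ n
instance (n : Int) : Decidable (Pre_allPermutes n) := by unfold Pre_allPermutes; infer_instance
def pvWitness_allPermutes : Int := (112)

def Spec_allPermutes (n : Int) (out : List Int) : Prop := out = allPermutes_alt n
instance (n : Int) (out : List Int) : Decidable (Spec_allPermutes n out) := by
  unfold Spec_allPermutes; infer_instance

-- ===== CLAIM (what is proved, stated in full; the proofs are below) =====
def Claim_equal_allPermutes : Prop :=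
  ∀ (n : Int), Dom_allPermutes n → Pre_allPermutes n → Spec_allPermutes n (allPermutes n)

-- ===== LEMMAS AND PROOFS =====

-- removing position i and re-consing l[i] is a rearrangement of l
theorem cons_eraseIdx_perm (l : List Char) (i : Nat) (h : i < l.length) :
    (l[i] :: l.eraseIdx i).Perm l := by
  conv_rhs => rw [← List.take_append_drop i l, ← List.getElem_cons_drop h]
  rw [List.eraseIdx_eq_take_drop_succ]
  exact List.perm_middle.symm

-- the two slices either port writes for "remove position i" are List.eraseIdx
theorem slice_pair_eq_eraseIdx (l : List Char) (i : Int) (h0 : 0 ≤ i) :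
    PySem.List.slice l none (some i) ++ PySem.List.slice l (some (i + 1)) none =
      l.eraseIdx i.toNat := by
  rw [PySem.List.slice_to l h0, PySem.List.slice_from l (by omega : (0:Int) ≤ i + 1),
    List.eraseIdx_eq_take_drop_succ]
  have : (i + 1).toNat = i.toNat + 1 := by omega
  rw [this]

-- one BFS step, characterised
theorem mem_bfsStep (st : List (List Char × List Char)) (p' r' : List Char) :
    (p', r') ∈ bfsStep st ↔
      ∃ p r, (p, r) ∈ st ∧ ∃ i : Nat, i < r.length ∧
        p' = p ++ [r.getD i ' '] ∧ r' = r.eraseIdx i := by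
  unfold bfsStep
  simp only [List.mem_flatMap, List.mem_map, PySem.List.mem_pyRange_one, Prod.exists,
    Prod.mk.injEq]
  constructor
  · rintro ⟨p, r, hmem, i, ⟨h0, hlt⟩, hp, hr⟩
    refine ⟨p, r, hmem, i.toNat, by omega, ?_, ?_⟩
    · rw [← hp, PySem.List.pyGetD_of_nonneg _ _ h0]
    · rw [← hr, slice_pair_eq_eraseIdx r i h0]
  · rintro ⟨p, r, hmem, i, hlt, hp, hr⟩
    refine ⟨p, r, hmem, (i : Int), ⟨by omega, by exact_mod_cast hlt⟩, ?_, ?_⟩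
    · rw [hp, PySem.List.pyGetD_of_nonneg _ _ (by omega : (0:Int) ≤ (i : Int))]
      simp
    · rw [hr, slice_pair_eq_eraseIdx r (i : Int) (by omega)]
      simp

theorem foldl_range_succ {α : Type} (F : α → α) (init : α) (k : Nat) :
    (List.range (k + 1)).foldl (fun st _ => F st) init =
      F ((List.range k).foldl (fun st _ => F st) init) := by
  rw [List.range_succ, List.foldl_append]
  rfl

-- soundness of the BFS worklist after k steps
theorem bfs_sound (s : List Char) (k : Nat) (p r : List Char)
    (h : (p, r) ∈ (List.range k).foldl (fun st _ => bfsStep st) [(([] : List Char), s)]) :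
    (p ++ r).Perm s ∧ p.length = k := by
  induction k generalizing p r with
  | zero =>
    simp only [List.range_zero, List.foldl_nil, List.mem_singleton, Prod.mk.injEq] at h
    obtain ⟨rfl, rfl⟩ := h
    exact ⟨List.Perm.refl _, rfl⟩
  | succ k IH =>
    rw [foldl_range_succ] at h
    obtain ⟨p0, r0, hmem, i, hlt, hp, hr⟩ := (mem_bfsStep _ _ _).mp h
    obtain ⟨hperm, hlen⟩ := IH p0 r0 hmem
    have hget : r0.getD i ' ' = r0[i] := List.getD_eq_getElem r0 ' ' hlt
    refine ⟨?_, by rw [hp]; simp [hlen]⟩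
    rw [hp, hr, hget]
    have h1 : (p0 ++ [r0[i]] ++ r0.eraseIdx i).Perm (p0 ++ r0) := by
      rw [List.append_assoc]
      exact List.Perm.append_left p0 (cons_eraseIdx_perm r0 i hlt)
    exact h1.trans hperm

-- completeness of the BFS worklist
theorem bfs_complete (s x : List Char) (hx : x.Perm s) (k : Nat) (hk : k ≤ s.length) :
    ∃ r, (x.take k, r) ∈ (List.range k).foldl (fun st _ => bfsStep st) [(([] : List Char), s)] ∧
      r.Perm (x.drop k) := by
  induction k with
  | zero =>
    exact ⟨s, by simp, by simpa using hx.symm⟩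
  | succ k IH =>
    obtain ⟨r, hmem, hr⟩ := IH (by omega)
    have hxlen : x.length = s.length := hx.length_eq
    have hklt : k < x.length := by omega
    have hdrop : x[k] :: x.drop (k + 1) = x.drop k := List.getElem_cons_drop hklt
    have hcons : (x[k] :: x.drop (k + 1)).Perm r := by rw [hdrop]; exact hr.symm
    have hmemr : x[k] ∈ r := hcons.subset (List.mem_cons_self)
    have hi : r.idxOf x[k] < r.length := List.idxOf_lt_length_of_mem hmemr
    have hgeti : r[r.idxOf x[k]] = x[k] := List.getElem_idxOf hi
    refine ⟨r.eraseIdx (r.idxOf x[k]), ?_, ?_⟩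
    · rw [foldl_range_succ]
      apply (mem_bfsStep _ _ _).mpr
      refine ⟨x.take k, r, hmem, r.idxOf x[k], hi, ?_, rfl⟩
      rw [List.getD_eq_getElem r ' ' hi, hgeti, List.take_add_one,
        List.getElem?_eq_getElem hklt]
      rfl
    · have h1 := cons_eraseIdx_perm r (r.idxOf x[k]) hi
      rw [hgeti] at h1
      exact (List.perm_cons x[k]).mp (h1.trans hcons.symm)

-- membership in A's recursive enumeration is exactly "is a permutation of s"
theorem mem_permuteA_aux (N : Nat) : ∀ (s x : List Char), s.length ≤ N →
    (x ∈ permuteA s ↔ x.Perm s) := by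
  induction N with
  | zero =>
    intro s x hlen
    rw [permuteA]
    have : s = [] := List.length_eq_zero_iff.mp (by omega)
    subst this
    simp [List.perm_nil]
  | succ N IH =>
    intro s x hlen
    rw [permuteA]
    by_cases h : s.length ≤ 1
    · simp only [h, if_true, List.mem_singleton]
      match s, h with
      | [], _ => simp [List.perm_nil]
      | [c], _ => simp [List.perm_singleton]
    · simp only [h, if_false, PySem.List.mem_sorted, PySem.Set.mem_ofList,
        PySem.List.foldl_append_eq_flatMap, List.nil_append, List.mem_flatMap,
        List.mem_attach, true_and, Subtype.exists, List.mem_map]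
      constructor
      · rintro ⟨i, hi, el, hel, rfl⟩
        have hm := (PySem.List.mem_pyRange_one).mp hi
        have h0 : (0:Int) ≤ i := hm.1
        have hlt : i.toNat < s.length := by omega
        rw [slice_pair_eq_eraseIdx s i h0] at hel
        have hel' : el.Perm (s.eraseIdx i.toNat) :=
          (IH (s.eraseIdx i.toNat) el (by rw [List.length_eraseIdx_of_lt hlt]; omega)).mp hel
        rw [PySem.List.pyGetD_of_nonneg _ _ h0, List.getD_eq_getElem s ' ' hlt]
        exact ((hel'.cons s[i.toNat]).trans (cons_eraseIdx_perm s i.toNat hlt))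
      · intro hp
        match x, hp with
        | [], hp => exact absurd hp.length_eq (by simp; omega)
        | c :: t, hp =>
          have hcs : c ∈ s := hp.subset (List.mem_cons_self)
          have hi : s.idxOf c < s.length := List.idxOf_lt_length_of_mem hcs
          have hgeti : s[s.idxOf c] = c := List.getElem_idxOf hi
          have ht : t.Perm (s.eraseIdx (s.idxOf c)) := by
            have h1 := cons_eraseIdx_perm s (s.idxOf c) hi
            rw [hgeti] at h1
            exact ((List.perm_cons c).mp (h1.trans hp.symm)).symm
          refine ⟨(s.idxOf c : Int),
            PySem.List.mem_pyRange_one.mpr ⟨by omega, by exact_mod_cast hi⟩, t, ?_, ?_⟩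
          · rw [slice_pair_eq_eraseIdx s (s.idxOf c : Int) (by omega)]
            apply (IH _ t ?_).mpr
            · simpa using ht
            · simp only [Int.toNat_natCast]
              rw [List.length_eraseIdx_of_lt hi]
              omega
          · rw [PySem.List.pyGetD_of_nonneg _ _ (by omega : (0:Int) ≤ (s.idxOf c : Int))]
            simp only [Int.toNat_natCast]
            rw [List.getD_eq_getElem s ' ' hi, hgeti]

theorem mem_permuteA (s x : List Char) : x ∈ permuteA s ↔ x.Perm s :=
  mem_permuteA_aux s.length s x le_rfl

-- the ports' sorted call and the library lemmas elaborate with different (propositionally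
-- equal) Decidable instances; bridge them once
theorem sorted_inst_bridge (xs : List (List Char)) (key : List Char → List Char) :
    @PySem.List.sorted (List Char) (List Char) List.instLT
      (fun a b => a.decidableLT b) xs key false =
    @PySem.List.sorted (List Char) (List Char) List.instLinearOrder.toLT
      LinearOrder.toDecidableLT xs key false := by
  congr 1

-- A's result is strictly increasing (hence duplicate-free)
theorem pairwise_permuteA (s : List Char) :
    List.Pairwise (fun a b => a < b) (permuteA s) := by
  rw [permuteA]
  by_cases h : s.length ≤ 1
  · simp [h]
  · simp only [h, if_false]
    rw [sorted_inst_bridge]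
    exact PySem.List.sorted_ofList_pairwise_lt (κ := List Char) _

-- membership in B's final worklist firsts is also "is a permutation of s"
theorem mem_bfs_final (s x : List Char) :
    x ∈ (((List.range s.length).foldl (fun st _ => bfsStep st)
        [(([] : List Char), s)]).map (·.1)) ↔ x.Perm s := by
  constructor
  · intro hx
    obtain ⟨⟨p, r⟩, hmem, rfl⟩ := List.mem_map.mp hx
    obtain ⟨hperm, hlen⟩ := bfs_sound s s.length p r hmem
    have hr : r = [] := by
      have := hperm.length_eq
      simp at this
      exact List.length_eq_zero_iff.mp (by omega)
    subst hr
    simpa using hperm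
  · intro hp
    obtain ⟨r, hmem, _⟩ := bfs_complete s x hp s.length le_rfl
    have hxl : x.length = s.length := hp.length_eq
    have htake : x.take s.length = x := by rw [← hxl]; exact List.take_length
    rw [htake] at hmem
    exact List.mem_map.mpr ⟨(x, r), hmem, rfl⟩

-- the two string-level enumerations agree
theorem permuteA_eq_bfs (s : List Char) :
    permuteA s =
      PySem.List.sorted
        (PySem.Set.ofList
          (((List.range s.length).foldl (fun st _ => bfsStep st)
              [(([] : List Char), s)]).map (·.1)))
        (fun x => x) := by
  rw [sorted_inst_bridge]
  refine (PySem.List.sorted_eq_of_perm_of_pairwise_lt (α := List Char) (κ := List Char)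
    _ _ (fun x => x) ?_ ?_).symm
  · apply (List.perm_ext_iff_of_nodup ?_ (PySem.Set.nodup_ofList _)).mpr
    · intro a
      rw [mem_permuteA, PySem.Set.mem_ofList, mem_bfs_final]
    · exact ((pairwise_permuteA s).imp fun hlt => ne_of_lt hlt)
  · exact pairwise_permuteA s

-- ===== VERDICT (by name: the statement is the Claim_ definition above) =====
theorem allPermutes_spec : Claim_equal_allPermutes := by
  intro n _ _
  unfold Spec_allPermutes allPermutes allPermutes_alt
  rw [permuteA_eq_bfs]
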